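-- pv_equiv track=rewrite | github.com/shuyangw/Homeguard | src/strategies/registry.py | _resolve_strategy_name
-- ===== SOURCE A (Python) =====
-- from typing import Dict, Type, Any, Optional, List, Tuple
--
-- _STRATEGY_REGISTRY: Dict[str, Tuple[str, str]] = {
--     # Base strategies
--     "MovingAverageCrossover": ("src.strategies.base_strategies.moving_average", "MovingAverageCrossover"),
--     "TripleMovingAverage": ("src.strategies.base_strategies.moving_average", "TripleMovingAverage"),
--     "MeanReversion": ("src.strategies.base_strategies.mean_reversion", "MeanReversion"),
--     "RSIMeanReversion": ("src.strategies.base_strategies.mean_reversion", "RSIMeanReversion"),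
--     "MeanReversionLongShort": ("src.strategies.base_strategies.mean_reversion_long_short", "MeanReversionLongShort"),
--     "MomentumStrategy": ("src.strategies.base_strategies.momentum", "MomentumStrategy"),
--     "BreakoutStrategy": ("src.strategies.base_strategies.momentum", "BreakoutStrategy"),
--
--     # Advanced strategies
--     "VolatilityTargetedMomentum": ("src.strategies.advanced.volatility_targeted_momentum", "VolatilityTargetedMomentum"),
--     "OvernightMeanReversion": ("src.strategies.advanced.overnight_mean_reversion", "OvernightMeanReversionStrategy"),
--     "OvernightMeanReversionStrategy": ("src.strategies.advanced.overnight_mean_reversion", "OvernightMeanReversionStrategy"),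
--     "CrossSectionalMomentum": ("src.strategies.advanced.cross_sectional_momentum", "CrossSectionalMomentum"),
--     "PairsTrading": ("src.strategies.advanced.pairs_trading", "PairsTrading"),
-- }
--
-- _DISPLAY_NAME_MAP: Dict[str, str] = {
--     "Moving Average Crossover": "MovingAverageCrossover",
--     "Triple Moving Average": "TripleMovingAverage",
--     "Mean Reversion": "MeanReversion",
--     "RSI Mean Reversion": "RSIMeanReversion",
--     "Mean Reversion Long Short": "MeanReversionLongShort",
--     "Momentum Strategy": "MomentumStrategy",
--     "Momentum": "MomentumStrategy",
--     "Breakout Strategy": "BreakoutStrategy",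
--     "Breakout": "BreakoutStrategy",
--     "Volatility Targeted Momentum": "VolatilityTargetedMomentum",
--     "Overnight Mean Reversion": "OvernightMeanReversion",
--     "OMR": "OvernightMeanReversion",
--     "Cross-Sectional Momentum": "CrossSectionalMomentum",
--     "Cross Sectional Momentum": "CrossSectionalMomentum",
--     "Pairs Trading": "PairsTrading",
--     "Pairs": "PairsTrading",
-- }
--
-- def _resolve_strategy_name(name: str) -> str:
--     """
--     Resolve a strategy name to its canonical class name.
--
--     Args:
--         name: Strategy name (class name or display name)
--
--     Returns:
--         Canonical class name
--     """
--     # Check if it's already a class name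
--     if name in _STRATEGY_REGISTRY:
--         return name
--
--     # Check display name map
--     if name in _DISPLAY_NAME_MAP:
--         return _DISPLAY_NAME_MAP[name]
--
--     # Case-insensitive search in display names
--     name_lower = name.lower()
--     for display_name, class_name in _DISPLAY_NAME_MAP.items():
--         if display_name.lower() == name_lower:
--             return class_name
--
--     # Case-insensitive search in class names
--     for class_name in _STRATEGY_REGISTRY:
--         if class_name.lower() == name_lower:
--             return class_name
--
--     raise ValueError(f"Unknown strategy: '{name}'. Available: {list_strategies()}")
--
-- def list_strategies() -> List[str]:
--     """
--     Get list of all available strategy class names.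
--
--     Returns:
--         List of strategy class names
--     """
--     return sorted(_STRATEGY_REGISTRY.keys())
-- ===== SOURCE B (Python) =====
-- from typing import List
--
-- def list_strategies() -> List[str]:
--     # sorted class names, inlined as a literal (the registry's sorted keys)
--     return ['BreakoutStrategy', 'CrossSectionalMomentum', 'MeanReversion',
--             'MeanReversionLongShort', 'MomentumStrategy', 'MovingAverageCrossover',
--             'OvernightMeanReversion', 'OvernightMeanReversionStrategy',
--             'PairsTrading', 'RSIMeanReversion', 'TripleMovingAverage',
--             'VolatilityTargetedMomentum']
--
-- def _canonical(lower: str):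
--     # One flat decision table on the lowercased name.  Every recognised spelling
--     # (class name or display alias, any case) lowercases to exactly one of these
--     # 28 keys, so a single match replaces the original's four lookup passes.
--     match lower:
--         case 'moving average crossover' | 'movingaveragecrossover':
--             return 'MovingAverageCrossover'
--         case 'triple moving average' | 'triplemovingaverage':
--             return 'TripleMovingAverage'
--         case 'mean reversion' | 'meanreversion':
--             return 'MeanReversion'
--         case 'rsi mean reversion' | 'rsimeanreversion':
--             return 'RSIMeanReversion'
--         case 'mean reversion long short' | 'meanreversionlongshort':
--             return 'MeanReversionLongShort'
--         case 'momentum strategy' | 'momentum' | 'momentumstrategy':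
--             return 'MomentumStrategy'
--         case 'breakout strategy' | 'breakout' | 'breakoutstrategy':
--             return 'BreakoutStrategy'
--         case 'volatility targeted momentum' | 'volatilitytargetedmomentum':
--             return 'VolatilityTargetedMomentum'
--         case 'overnight mean reversion' | 'omr' | 'overnightmeanreversion':
--             return 'OvernightMeanReversion'
--         case 'overnightmeanreversionstrategy':
--             return 'OvernightMeanReversionStrategy'
--         case 'cross-sectional momentum' | 'cross sectional momentum' | 'crosssectionalmomentum':
--             return 'CrossSectionalMomentum'
--         case 'pairs trading' | 'pairs' | 'pairstrading':
--             return 'PairsTrading'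
--         case _:
--             return None
--
-- def _resolve_strategy_name(name: str) -> str:
--     c = _canonical(name.lower())
--     if c is None:
--         raise ValueError(f"Unknown strategy: '{name}'. Available: {list_strategies()}")
--     return c
-- ===== Notes on version B (the rewrite author's own statement) =====
-- stated objective: simpler
-- what changed: A's four sequential passes (exact registry membership, exact display-map lookup, then two case-insensitive scans over the two dicts) are replaced by a single flat decision table: one match statement on name.lower() with the 28 recognised lowercased spellings mapping directly to canonical class names, no dictionaries at runtime; correct because every recognised spelling lowercases to a unique table key whose value is exactly what A's precedence order yields.
import Mathlib
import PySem

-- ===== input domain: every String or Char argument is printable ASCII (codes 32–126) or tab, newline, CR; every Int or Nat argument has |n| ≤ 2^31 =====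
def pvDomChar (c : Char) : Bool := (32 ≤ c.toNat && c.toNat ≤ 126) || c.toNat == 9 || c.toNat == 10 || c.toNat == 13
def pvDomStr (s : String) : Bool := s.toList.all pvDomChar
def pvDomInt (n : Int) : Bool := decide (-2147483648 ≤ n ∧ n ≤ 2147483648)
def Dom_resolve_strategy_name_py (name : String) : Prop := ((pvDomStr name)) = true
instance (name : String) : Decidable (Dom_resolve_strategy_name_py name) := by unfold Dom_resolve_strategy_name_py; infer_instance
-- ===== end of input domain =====

-- B replaces A's dict lookups plus two case-insensitive scans by one flat decision
-- table (a single match on the lowercased name); simpler: one pass, no maps at runtime.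

-- ===== PORT A =====
-- module constant _STRATEGY_REGISTRY (values are (module, class) pairs, unused by lookups)
def pvRegistry : PySem.Dict String (String × String) := PySem.Dict.ofList [
  ("MovingAverageCrossover", ("src.strategies.base_strategies.moving_average", "MovingAverageCrossover")),
  ("TripleMovingAverage", ("src.strategies.base_strategies.moving_average", "TripleMovingAverage")),
  ("MeanReversion", ("src.strategies.base_strategies.mean_reversion", "MeanReversion")),
  ("RSIMeanReversion", ("src.strategies.base_strategies.mean_reversion", "RSIMeanReversion")),
  ("MeanReversionLongShort", ("src.strategies.base_strategies.mean_reversion_long_short", "MeanReversionLongShort")),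
  ("MomentumStrategy", ("src.strategies.base_strategies.momentum", "MomentumStrategy")),
  ("BreakoutStrategy", ("src.strategies.base_strategies.momentum", "BreakoutStrategy")),
  ("VolatilityTargetedMomentum", ("src.strategies.advanced.volatility_targeted_momentum", "VolatilityTargetedMomentum")),
  ("OvernightMeanReversion", ("src.strategies.advanced.overnight_mean_reversion", "OvernightMeanReversionStrategy")),
  ("OvernightMeanReversionStrategy", ("src.strategies.advanced.overnight_mean_reversion", "OvernightMeanReversionStrategy")),
  ("CrossSectionalMomentum", ("src.strategies.advanced.cross_sectional_momentum", "CrossSectionalMomentum")),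
  ("PairsTrading", ("src.strategies.advanced.pairs_trading", "PairsTrading"))]

-- module constant _DISPLAY_NAME_MAP
def pvDisplay : PySem.Dict String String := PySem.Dict.ofList [
  ("Moving Average Crossover", "MovingAverageCrossover"),
  ("Triple Moving Average", "TripleMovingAverage"),
  ("Mean Reversion", "MeanReversion"),
  ("RSI Mean Reversion", "RSIMeanReversion"),
  ("Mean Reversion Long Short", "MeanReversionLongShort"),
  ("Momentum Strategy", "MomentumStrategy"),
  ("Momentum", "MomentumStrategy"),
  ("Breakout Strategy", "BreakoutStrategy"),
  ("Breakout", "BreakoutStrategy"),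
  ("Volatility Targeted Momentum", "VolatilityTargetedMomentum"),
  ("Overnight Mean Reversion", "OvernightMeanReversion"),
  ("OMR", "OvernightMeanReversion"),
  ("Cross-Sectional Momentum", "CrossSectionalMomentum"),
  ("Cross Sectional Momentum", "CrossSectionalMomentum"),
  ("Pairs Trading", "PairsTrading"),
  ("Pairs", "PairsTrading")]

-- list_strategies() = sorted(_STRATEGY_REGISTRY.keys())
def list_strategies_py : List String := PySem.List.sorted pvRegistry.keys (fun s => s) false

-- A's ValueError message text (unreached under Pre_)
def pvErrMsg (name : String) : String :=
  PySem.Str.join "" ["Unknown strategy: '", name, "'. Available: [",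
    PySem.Str.join ", " (list_strategies_py.map (fun k => PySem.Str.join "" ["'", k, "'"])), "]"]

def resolve_strategy_name_py (name : String) : String :=
  if pvRegistry.contains name then name
  else
    match pvDisplay.get? name with
    | some v => v
    | none =>
      let nameLower := PySem.Str.lower name
      match pvDisplay.items.find? (fun kv => PySem.Str.lower kv.1 == nameLower) with
      | some kv => kv.2
      | none =>
        match pvRegistry.keys.find? (fun k => PySem.Str.lower k == nameLower) with
        | some k => k
        | none => pvErrMsg name   -- raise ValueError(...): unreached under Pre_

-- ===== PORT B =====
-- Source B's list_strategies(): the sorted class names as a literal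
def pvSortedNames : List String :=
  ["BreakoutStrategy", "CrossSectionalMomentum", "MeanReversion",
   "MeanReversionLongShort", "MomentumStrategy", "MovingAverageCrossover",
   "OvernightMeanReversion", "OvernightMeanReversionStrategy",
   "PairsTrading", "RSIMeanReversion", "TripleMovingAverage",
   "VolatilityTargetedMomentum"]

-- Source B's _canonical: one flat decision table on the lowercased name
def pvCanonical (lower : String) : Option String :=
  match lower with
  | "moving average crossover" | "movingaveragecrossover" => some "MovingAverageCrossover"
  | "triple moving average" | "triplemovingaverage" => some "TripleMovingAverage"
  | "mean reversion" | "meanreversion" => some "MeanReversion"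
  | "rsi mean reversion" | "rsimeanreversion" => some "RSIMeanReversion"
  | "mean reversion long short" | "meanreversionlongshort" => some "MeanReversionLongShort"
  | "momentum strategy" | "momentum" | "momentumstrategy" => some "MomentumStrategy"
  | "breakout strategy" | "breakout" | "breakoutstrategy" => some "BreakoutStrategy"
  | "volatility targeted momentum" | "volatilitytargetedmomentum" => some "VolatilityTargetedMomentum"
  | "overnight mean reversion" | "omr" | "overnightmeanreversion" => some "OvernightMeanReversion"
  | "overnightmeanreversionstrategy" => some "OvernightMeanReversionStrategy"
  | "cross-sectional momentum" | "cross sectional momentum" | "crosssectionalmomentum" => some "CrossSectionalMomentum"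
  | "pairs trading" | "pairs" | "pairstrading" => some "PairsTrading"
  | _ => none

-- B's ValueError message (unreached under Pre_)
def pvErrMsgB (name : String) : String :=
  PySem.Str.join "" ["Unknown strategy: '", name, "'. Available: [",
    PySem.Str.join ", " (pvSortedNames.map (fun k => PySem.Str.join "" ["'", k, "'"])), "]"]

def resolve_strategy_name_py_alt (name : String) : String :=
  match pvCanonical (PySem.Str.lower name) with
  | some c => c
  | none => pvErrMsgB name   -- raise ValueError(...): unreached under Pre_

-- ===== PRECONDITION & SPEC =====
-- Pre_ excludes exactly the inputs on which A raises ValueError (unknown names):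
-- A returns a value iff name.lower() is one of the 28 lowercased known keys.
def pvLowerKeys : List String :=
  ["moving average crossover", "triple moving average", "mean reversion",
   "rsi mean reversion", "mean reversion long short", "momentum strategy", "momentum",
   "breakout strategy", "breakout", "volatility targeted momentum",
   "overnight mean reversion", "omr", "cross-sectional momentum",
   "cross sectional momentum", "pairs trading", "pairs",
   "movingaveragecrossover", "triplemovingaverage", "meanreversion",
   "rsimeanreversion", "meanreversionlongshort", "momentumstrategy",
   "breakoutstrategy", "volatilitytargetedmomentum", "overnightmeanreversion",
   "overnightmeanreversionstrategy", "crosssectionalmomentum", "pairstrading"]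

def Pre_resolve_strategy_name_py (name : String) : Prop :=
  PySem.Str.lower name ∈ pvLowerKeys
instance (name : String) : Decidable (Pre_resolve_strategy_name_py name) := by
  unfold Pre_resolve_strategy_name_py; infer_instance

def pvWitness_resolve_strategy_name_py : String := "Momentum"

def Spec_resolve_strategy_name_py (name : String) (out : String) : Prop := out = resolve_strategy_name_py_alt name
instance (name : String) (out : String) : Decidable (Spec_resolve_strategy_name_py name out) := by unfold Spec_resolve_strategy_name_py; infer_instance

-- ===== CLAIM =====
def Claim_equal_resolve_strategy_name_py : Prop := ∀ (name : String), Dom_resolve_strategy_name_py name → Pre_resolve_strategy_name_py name → Spec_resolve_strategy_name_py name (resolve_strategy_name_py name)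

-- ===== LEMMAS AND PROOFS =====

-- the 28 exact keys of both maps (display then registry), used to split the proof
def pvExactKeys : List String :=
  ["Moving Average Crossover", "Triple Moving Average", "Mean Reversion",
   "RSI Mean Reversion", "Mean Reversion Long Short", "Momentum Strategy", "Momentum",
   "Breakout Strategy", "Breakout", "Volatility Targeted Momentum", "Overnight Mean Reversion",
   "OMR", "Cross-Sectional Momentum", "Cross Sectional Momentum", "Pairs Trading", "Pairs",
   "MovingAverageCrossover", "TripleMovingAverage", "MeanReversion", "RSIMeanReversion",
   "MeanReversionLongShort", "MomentumStrategy", "BreakoutStrategy", "VolatilityTargetedMomentum",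
   "OvernightMeanReversion", "OvernightMeanReversionStrategy", "CrossSectionalMomentum",
   "PairsTrading"]

set_option maxRecDepth 100000 in
set_option maxHeartbeats 1000000 in
lemma pvKeys_eq : pvDisplay.keys ++ pvRegistry.keys = pvExactKeys := by decide

-- A's two case-insensitive scans, as a function of the lowered name only
def pvLowResolveA (L : String) : Option String :=
  match pvDisplay.items.find? (fun kv => PySem.Str.lower kv.1 == L) with
  | some kv => some kv.2
  | none => pvRegistry.keys.find? (fun k => PySem.Str.lower k == L)

set_option maxRecDepth 100000 in
set_option maxHeartbeats 1000000 in
lemma pvExact_cases : ∀ n ∈ pvExactKeys,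
    resolve_strategy_name_py n = resolve_strategy_name_py_alt n := by decide

set_option maxRecDepth 100000 in
set_option maxHeartbeats 1000000 in
lemma pvLow_cases : ∀ L ∈ pvLowerKeys, pvLowResolveA L = pvCanonical L := by decide

lemma pvNoExact (name : String) (hc : pvRegistry.contains name = false)
    (hg : pvDisplay.get? name = none) :
    resolve_strategy_name_py name
      = (pvLowResolveA (PySem.Str.lower name)).getD (pvErrMsg name) := by
  unfold resolve_strategy_name_py pvLowResolveA
  rw [hc, hg]
  simp only [Bool.false_eq_true, if_false]
  cases pvDisplay.items.find? (fun kv => PySem.Str.lower kv.1 == PySem.Str.lower name) <;>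
    cases pvRegistry.keys.find? (fun k => PySem.Str.lower k == PySem.Str.lower name) <;>
      simp

lemma pvAltEq (name : String) :
    resolve_strategy_name_py_alt name
      = (pvCanonical (PySem.Str.lower name)).getD (pvErrMsgB name) := by
  unfold resolve_strategy_name_py_alt
  cases pvCanonical (PySem.Str.lower name) <;> simp

set_option maxRecDepth 100000 in
set_option maxHeartbeats 1000000 in
lemma pvLow_some : ∀ L ∈ pvLowerKeys, (pvCanonical L).isSome = true := by decide

-- ===== VERDICT =====
theorem resolve_strategy_name_py_spec : Claim_equal_resolve_strategy_name_py := by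
  intro name _hdom hpre
  unfold Spec_resolve_strategy_name_py
  by_cases hx : name ∈ pvExactKeys
  · exact pvExact_cases name hx
  · have hc : pvRegistry.contains name = false := by
      rw [PySem.Dict.contains_eq_decide_mem_keys, decide_eq_false_iff_not]
      exact fun h => hx (pvKeys_eq ▸ List.mem_append.mpr (Or.inr h))
    have hg : pvDisplay.get? name = none := by
      rw [PySem.Dict.get?_eq_none_iff_not_mem_keys]
      exact fun h => hx (pvKeys_eq ▸ List.mem_append.mpr (Or.inl h))
    rw [pvNoExact name hc hg, pvAltEq, pvLow_cases _ hpre]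
    obtain ⟨v, hv⟩ := Option.isSome_iff_exists.mp (pvLow_some _ hpre)
    rw [hv]; simp
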